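-- pv_equiv track=rewrite | github.com/pgenev/adventofcode-2023 | day15/solution_part2.py | hash_algorithm
-- ===== SOURCE A (Python) =====
-- def hash_algorithm(sub_sequence: str) -> int:
--     box_number = None
--     new_sequence = []
--     for char in sub_sequence:
--         if char in ("=", "-"):
--             if char == "-":
--                 new_sequence.append(char)
--             continue
--         if char.isdigit():
--             new_sequence.append(char)
--             continue
--         if not box_number:
--             box_number = ord(char) * 17
--             box_number %= 256
--             new_sequence.append(char)
--             continue
--         box_number += ord(char)
--         box_number *= 17
--         box_number %= 256
--         new_sequence.append(char)
--
--     return box_number, "".join(new_sequence)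
-- ===== SOURCE B (Python) =====
-- def hash_algorithm(sub_sequence: str) -> int:
--     letters = [c for c in sub_sequence if not c.isdigit() and c not in "=-"]
--     box_number = None
--     if letters:
--         box_number = sum(ord(c) * pow(17, e, 256)
--                          for e, c in enumerate(reversed(letters), 1)) % 256
--     return box_number, "".join(c for c in sub_sequence if c != "=")
-- ===== Notes on version B (the rewrite author's own statement) =====
-- stated objective: alternative
-- what changed: Replaced A's rolling state-machine hash with a closed-form positional-weight sum: collect the contributing letters, then compute sum(ord(c)*pow(17,e,256)) over the reversed letter list with enumerate and reduce mod 256 once, building the filtered label string in a separate pass.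
import Mathlib
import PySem

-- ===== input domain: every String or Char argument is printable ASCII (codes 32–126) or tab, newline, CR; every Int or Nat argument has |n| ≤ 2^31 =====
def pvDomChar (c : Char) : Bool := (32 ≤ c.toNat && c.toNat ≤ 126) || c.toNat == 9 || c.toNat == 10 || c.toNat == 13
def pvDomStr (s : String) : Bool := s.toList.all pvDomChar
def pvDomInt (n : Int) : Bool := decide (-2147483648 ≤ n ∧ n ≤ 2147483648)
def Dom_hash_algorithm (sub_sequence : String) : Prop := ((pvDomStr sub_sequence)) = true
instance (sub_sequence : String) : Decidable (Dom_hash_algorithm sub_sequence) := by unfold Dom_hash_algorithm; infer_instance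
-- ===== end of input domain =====

-- B replaces A's rolling state-machine hash by a closed-form positional-weight sum
-- (ord(c)·17^e mod 256 over the reversed letter list) plus a separate filter pass;
-- objective: alternative. Equivalent everywhere (return value; A mutates nothing).

-- ===== PORT A =====
-- one loop step of A over state (box_number, new_sequence)
def hashStepA (st : Option Int × List Char) (c : Char) : Option Int × List Char :=
  if c = '=' ∨ c = '-' then
    if c = '-' then (st.1, st.2 ++ [c]) else (st.1, st.2)
  else if PySem.Chars.isdigit c then
    (st.1, st.2 ++ [c])
  else if st.1 = none ∨ st.1 = some 0 then  -- Python falsy test on box_number: None or 0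
    (some (PySem.Int.mod ((c.toNat : Int) * 17) 256), st.2 ++ [c])
  else
    (some (PySem.Int.mod (((st.1.getD 0) + (c.toNat : Int)) * 17) 256), st.2 ++ [c])

def hash_algorithm (sub_sequence : String) : Option Int × String :=
  let st := sub_sequence.toList.foldl hashStepA (none, [])
  (st.1, String.ofList st.2)

-- ===== PORT B =====
-- Source B's letter comprehension predicate
def isLetterB (c : Char) : Bool := !(PySem.Chars.isdigit c) && !(c == '=') && !(c == '-')

-- one step of Source B's sum over enumerate(reversed(letters), 1): acc + ord(c) * pow(17, e, 256)
def sumStepB (acc : Int) (p : Int × Char) : Int :=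
  acc + (p.2.toNat : Int) * PySem.Int.powMod 17 p.1.toNat 256

def hash_algorithm_alt (sub_sequence : String) : Option Int × String :=
  let letters := sub_sequence.toList.filter isLetterB
  let box : Option Int :=
    if letters = [] then none
    else some (PySem.Int.mod ((PySem.List.enumerate letters.reverse 1).foldl sumStepB 0) 256)
  (box, String.ofList (sub_sequence.toList.filter (fun c => !(c == '='))))

-- ===== PRECONDITION & SPEC =====
def Spec_hash_algorithm (sub_sequence : String) (out : Option Int × String) : Prop := out = hash_algorithm_alt sub_sequence
instance (sub_sequence : String) (out : Option Int × String) : Decidable (Spec_hash_algorithm sub_sequence out) := by unfold Spec_hash_algorithm; infer_instance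

-- ===== CLAIM (what is proved, stated in full; the proofs are below) =====
def Claim_equal_hash_algorithm : Prop := ∀ (sub_sequence : String), Dom_hash_algorithm sub_sequence → Spec_hash_algorithm sub_sequence (hash_algorithm sub_sequence)

-- ===== LEMMAS AND PROOFS =====

-- A's rolling update on an initialised box, as a plain Int step
def stepI (b : Int) (c : Char) : Int := PySem.Int.mod ((b + (c.toNat : Int)) * 17) 256

-- positional-weight sum: U l k = Σ_j ord(l_j) · 17^(k+j)
def U : List Char → Nat → Int
  | [], _ => 0
  | c :: t, k => (c.toNat : Int) * 17 ^ k + U t (k + 1)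

-- A's box component as a function of the initial box and the letter list
def aBox (bn : Option Int) (lf : List Char) : Option Int :=
  if bn = none ∧ lf = [] then none else some (lf.foldl stepI (bn.getD 0))

theorem aBox_letter (bn : Option Int) (lf : List Char) (c : Char) :
    aBox bn (c :: lf) =
      aBox (some (if bn = none ∨ bn = some 0
                  then PySem.Int.mod ((c.toNat : Int) * 17) 256
                  else PySem.Int.mod (((bn.getD 0) + (c.toNat : Int)) * 17) 256)) lf := by
  by_cases h : bn = none ∨ bn = some 0
  · have hbn : bn.getD 0 = 0 := by rcases h with h | h <;> simp [h]
    simp [aBox, h, hbn, stepI, List.foldl_cons]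
  · simp [aBox, h, stepI, List.foldl_cons]

-- A's loop in closed state form: box = aBox over the letters, string = filter (≠ '=')
theorem foldA_closed (l : List Char) (bn : Option Int) (ns : List Char) :
    l.foldl hashStepA (bn, ns) =
      (aBox bn (l.filter isLetterB), ns ++ l.filter (fun c => !(c == '='))) := by
  induction l generalizing bn ns with
  | nil => cases bn <;> simp [aBox]
  | cons c t ih =>
    simp only [List.foldl_cons, List.filter_cons]
    by_cases h1 : c = '=' ∨ c = '-'
    · rcases h1 with h | h
      · subst h
        simpa [hashStepA, isLetterB, PySem.Chars.isdigit] using ih bn ns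
      · have : PySem.Chars.isdigit '-' = false := by decide
        subst h
        simpa [hashStepA, isLetterB, this] using ih bn (ns ++ ['-'])
    · push Not at h1
      by_cases h2 : PySem.Chars.isdigit c = true
      · simpa [hashStepA, isLetterB, h1.1, h1.2, h2] using ih bn (ns ++ [c])
      · have hL : isLetterB c = true := by
          simp [isLetterB, h1.1, h1.2]
          simpa using h2
        rw [if_pos hL, aBox_letter bn _ c]
        by_cases h3 : bn = none ∨ bn = some 0
        · simpa [hashStepA, hL, h2, h3, h1.1, h1.2] using
            ih (some (PySem.Int.mod ((c.toNat : Int) * 17) 256)) (ns ++ [c])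
        · simpa [hashStepA, hL, h2, h3, h1.1, h1.2] using
            ih (some (PySem.Int.mod (((bn.getD 0) + (c.toNat : Int)) * 17) 256)) (ns ++ [c])

-- the inner mod of a product is absorbed by the outer mod
theorem mod_absorb (x y z : Int) :
    PySem.Int.mod (x * PySem.Int.mod y 256 + z) 256 = PySem.Int.mod (x * y + z) 256 := by
  rw [PySem.Int.mod_eq_emod_of_pos (a := y) (by norm_num),
      PySem.Int.mod_eq_emod_of_pos (by norm_num), PySem.Int.mod_eq_emod_of_pos (by norm_num)]
  exact Int.ModEq.add_right z (Int.ModEq.mul_left x (Int.emod_emod_of_dvd y dvd_rfl))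

theorem U_append (r : List Char) (c : Char) (k : Nat) :
    U (r ++ [c]) k = U r k + (c.toNat : Int) * 17 ^ (k + r.length) := by
  induction r generalizing k with
  | nil => simp [U]
  | cons a t ih =>
    simp only [List.cons_append, U, ih (k + 1), List.length_cons]
    ring_nf

-- A's fold from any start, modulo 256, is the positional-weight sum over the reversed list
theorem foldI_modEq (l : List Char) (b : Int) :
    PySem.Int.mod (l.foldl stepI b) 256 =
      PySem.Int.mod (17 ^ l.length * b + U l.reverse 1) 256 := by
  induction l generalizing b with
  | nil =>
    simp [U]
  | cons c t ih =>
    simp only [List.foldl_cons, List.reverse_cons, List.length_cons]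
    rw [ih (stepI b c), U_append, stepI]
    rw [mod_absorb (17 ^ t.length) ((b + (c.toNat : Int)) * 17) (U t.reverse 1)]
    congr 1
    simp only [List.length_reverse]
    ring

-- stepI's output is already reduced mod 256
theorem mod_stepI (b : Int) (c : Char) : PySem.Int.mod (stepI b c) 256 = stepI b c := by
  unfold stepI
  rw [PySem.Int.mod_eq_emod_of_pos (by norm_num), PySem.Int.mod_eq_emod_of_pos (by norm_num)]
  exact Int.emod_emod_of_dvd _ dvd_rfl

theorem foldI_reduced (l : List Char) (b : Int) (h : l ≠ []) :
    PySem.Int.mod (l.foldl stepI b) 256 = l.foldl stepI b := by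
  rcases (List.eq_nil_or_concat l) with rfl | ⟨l', a, rfl⟩
  · exact absurd rfl h
  · rw [List.concat_eq_append, List.foldl_append]
    simp only [List.foldl_cons, List.foldl_nil]
    exact mod_stepI _ _

-- B's enumerate-sum, modulo 256, equals the positional-weight sum
theorem foldB_modEq (r : List Char) (k : Nat) (acc : Int) :
    PySem.Int.mod ((PySem.List.enumerate r (k : Int)).foldl sumStepB acc) 256 =
      PySem.Int.mod (acc + U r k) 256 := by
  induction r generalizing k acc with
  | nil => simp [PySem.List.enumerate, U]
  | cons c t ih =>
    rw [PySem.List.enumerate_cons, List.foldl_cons]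
    have hk : ((k : Int) + 1) = ((k + 1 : Nat) : Int) := by push_cast; ring
    rw [hk, ih (k + 1) _]
    have hpow : PySem.Int.powMod 17 ((k : Int)).toNat 256 = PySem.Int.mod (17 ^ k) 256 := by
      simp [PySem.Int.powMod]
    rw [show sumStepB acc ((k : Int), c) =
          acc + (c.toNat : Int) * PySem.Int.powMod 17 ((k : Int)).toNat 256 from rfl, hpow]
    rw [show acc + (c.toNat : Int) * PySem.Int.mod (17 ^ k) 256 + U t (k + 1) =
          (c.toNat : Int) * PySem.Int.mod (17 ^ k) 256 + (acc + U t (k + 1)) from by ring]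
    rw [mod_absorb]
    congr 1
    simp only [U]
    ring

-- ===== VERDICT (by name: the statement is the Claim_ definition above) =====
theorem hash_algorithm_spec : Claim_equal_hash_algorithm := by
  intro s _
  unfold Spec_hash_algorithm hash_algorithm hash_algorithm_alt
  rw [foldA_closed s.toList none []]
  simp only [List.nil_append]
  refine Prod.ext ?_ rfl
  by_cases h : s.toList.filter isLetterB = []
  · simp [h, aBox]
  · have h1 : aBox none (s.toList.filter isLetterB) =
        some ((s.toList.filter isLetterB).foldl stepI 0) := by
      simp [aBox, h]
    rw [h1]
    simp only [h]
    congr 1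
    rw [← foldI_reduced _ 0 h, foldI_modEq]
    have := foldB_modEq (s.toList.filter isLetterB).reverse 1 0
    rw [show ((1 : Nat) : Int) = (1 : Int) from rfl] at this
    rw [this]
    congr 1
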